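-- pv_equiv track=rewrite | github.com/i026e/MurmanBus | MurmanskBusRaw/Tables/jsonGen.py | split_table
-- ===== SOURCE A (Python) =====
-- def split_table(table):
--     flag = True
--     one =[]
--     another =[]
--     for line in table:
--         for entry in line:
--             if len(entry) != 0:
--                 if flag:
--                     one.append(entry)
--                 else:
--                     another.append(entry)
--             else:
--                 flag = False
--     return one, another
-- ===== SOURCE B (Python) =====
-- def split_table(table):
--     flat = [entry for line in table for entry in line]
--     i = next((k for k, e in enumerate(flat) if len(e) == 0), len(flat))
--     one = flat[:i]
--     another = [e for e in flat[i + 1:] if len(e) != 0]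
--     return one, another
-- ===== Notes on version B (the rewrite author's own statement) =====
-- stated objective: simpler
-- what changed: Replaces the nested loops with a stateful flag by flattening the table once, locating the first empty entry's index, and building the two lists as a slice before it and a filtered slice after it.
import Mathlib
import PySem

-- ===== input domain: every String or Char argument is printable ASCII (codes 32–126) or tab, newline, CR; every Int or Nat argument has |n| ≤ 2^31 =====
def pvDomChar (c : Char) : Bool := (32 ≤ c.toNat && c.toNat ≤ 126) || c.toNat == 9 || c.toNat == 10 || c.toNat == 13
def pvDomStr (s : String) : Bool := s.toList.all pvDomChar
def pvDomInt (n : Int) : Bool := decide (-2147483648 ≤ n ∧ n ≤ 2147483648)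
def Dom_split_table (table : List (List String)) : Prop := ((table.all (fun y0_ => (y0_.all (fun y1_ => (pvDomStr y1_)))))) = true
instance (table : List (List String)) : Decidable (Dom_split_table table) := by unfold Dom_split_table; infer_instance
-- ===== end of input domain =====

-- B simplifies A: one flatten pass, find the first empty entry, split/filter around it (return value only; no speed claim).

-- ===== PORT A =====
-- loop body of A: state = (flag, one, another), processing one entry
def pvStepA (st : Bool × List String × List String) (entry : String) :
    Bool × List String × List String :=
  if PySem.Str.len entry ≠ 0 then
    if st.1 then (st.1, st.2.1 ++ [entry], st.2.2)
    else (st.1, st.2.1, st.2.2 ++ [entry])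
  else (false, st.2.1, st.2.2)

def split_table (table : List (List String)) : List String × List String :=
  let s := table.foldl (fun st line => line.foldl pvStepA st) (true, [], [])
  (s.2.1, s.2.2)

-- ===== PORT B =====
def split_table_alt (table : List (List String)) : List String × List String :=
  let flat := table.flatMap (fun line => line)
  -- next((k for k, e in enumerate(flat) if len(e) == 0), len(flat))
  let i := (flat.findIdx? (fun e => decide (PySem.Str.len e = 0))).getD flat.length
  -- flat[:i] and flat[i+1:] with i ≥ 0: exactly List.take / List.drop
  (flat.take i, (flat.drop (i + 1)).filter (fun e => decide (PySem.Str.len e ≠ 0)))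

-- ===== PRECONDITION & SPEC =====
def Spec_split_table (table : List (List String)) (out : List String × List String) : Prop := out = split_table_alt table
instance (table : List (List String)) (out : List String × List String) : Decidable (Spec_split_table table out) := by unfold Spec_split_table; infer_instance

-- ===== CLAIM (what is proved, stated in full; the proofs are below) =====
def Claim_equal_split_table : Prop := ∀ (table : List (List String)), Dom_split_table table → Spec_split_table table (split_table table)

-- ===== LEMMAS AND PROOFS =====

theorem pvLenZero (x : String) : (PySem.Str.len x = 0) ↔ x = "" := by
  simp [PySem.Str.len_eq]

theorem pvFoldA_false (l : List String) (o a : List String) :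
    l.foldl pvStepA (false, o, a) =
      (false, o, a ++ l.filter (fun e => decide (PySem.Str.len e ≠ 0))) := by
  induction l generalizing a with
  | nil => simp
  | cons x xs ih =>
      by_cases h : x = "" <;>
        simp [pvStepA, h, ih]

theorem pvFoldA_true (l : List String) (o a : List String) :
    l.foldl pvStepA (true, o, a) =
      ((l.findIdx? (fun e => decide (PySem.Str.len e = 0))).isNone,
       o ++ l.take ((l.findIdx? (fun e => decide (PySem.Str.len e = 0))).getD l.length),
       a ++ (l.drop (((l.findIdx? (fun e => decide (PySem.Str.len e = 0))).getD l.length) + 1)).filter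
              (fun e => decide (PySem.Str.len e ≠ 0))) := by
  induction l generalizing o a with
  | nil => simp
  | cons x xs ih =>
      by_cases h : x = ""
      · simp [pvStepA, h, List.findIdx?_cons, pvFoldA_false]
      · rw [List.foldl_cons]
        have hs : pvStepA (true, o, a) x = (true, o ++ [x], a) := by
          simp [pvStepA, h]
        rw [hs, ih]
        simp only [pvLenZero]
        cases hfi : xs.findIdx? (fun e => decide (e = "")) with
        | none => simp [List.findIdx?_cons, h, hfi]
        | some i => simp [List.findIdx?_cons, h, hfi]

theorem pvNested_eq_flat (table : List (List String)) (init : Bool × List String × List String) :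
    table.foldl (fun st line => line.foldl pvStepA st) init =
      (table.flatMap (fun line => line)).foldl pvStepA init := by
  induction table generalizing init with
  | nil => simp
  | cons l ls ih => simp [List.flatMap_cons, List.foldl_append, ih]

-- ===== VERDICT (by name: the statement is the Claim_ definition above) =====
theorem split_table_spec : Claim_equal_split_table := by
  intro table _
  unfold Spec_split_table split_table split_table_alt
  rw [pvNested_eq_flat, pvFoldA_true]
  simp
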